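-- pv_equiv track=rewrite | github.com/Dong98-code/leetcode | codes/leetcode_problems/391.完美矩阵.py | isRectangleCover
-- ===== SOURCE A (Python) =====
-- from collections import defaultdict
--
-- def isRectangleCover(rectangles) -> bool:
--     cnt_dic = defaultdict(int)
--     min_x, min_y, max_a, max_b = rectangles[0]
--     arra_sum = 0
--     for i in range(len(rectangles)):
--         x, y, a, b = rectangles[i]
--         # 计算总面积
--         arra_sum += (a-x)*(b-y)
--         # 寻找最小的
--         min_x = min(min_x, x)
--         min_y = min(min_y, y)
--         max_a = max(max_a, a)
--         max_b = max(max_b, b)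
--
--         # 将四个顶点加入到 hash表里
--         cnt_dic[(x, y)] += 1
--         cnt_dic[(x, b)] += 1
--         cnt_dic[(a, b)] += 1
--         cnt_dic[(a, y)] += 1
--     if arra_sum != (max_a-min_x)*(max_b-min_y) or cnt_dic[(min_x, min_y)] != 1 or cnt_dic[(min_x, max_b)] != 1 or cnt_dic[(max_a, min_y)] != 1 or cnt_dic[(max_a, max_b)] != 1:
--         return False
--     del cnt_dic[(min_x, min_y)]
--     del cnt_dic[(min_x, max_b)]
--     del cnt_dic[(max_a, min_y)]
--     del cnt_dic[(max_a, max_b)]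
--     for value in cnt_dic.values():
--         if value == 2 or value == 4:
--             continue
--         else:
--             return False
--     return True
-- ===== SOURCE B (Python) =====
-- def isRectangleCover(rectangles) -> bool:
--     min_x = min(r[0] for r in rectangles)
--     min_y = min(r[1] for r in rectangles)
--     max_a = max(r[2] for r in rectangles)
--     max_b = max(r[3] for r in rectangles)
--     if sum((a - x) * (b - y) for x, y, a, b in rectangles) != (max_a - min_x) * (max_b - min_y):
--         return False
--     corners = sorted(c for x, y, a, b in rectangles
--                      for c in ((x, y), (x, b), (a, b), (a, y)))
--     box = ((min_x, min_y), (min_x, max_b), (max_a, min_y), (max_a, max_b))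
--     for p in box:
--         if corners.count(p) != 1:
--             return False
--     i, n = 0, len(corners)
--     while i < n:
--         j = i
--         while j < n and corners[j] == corners[i]:
--             j += 1
--         if corners[i] not in box and j - i not in (2, 4):
--             return False
--         i = j
--     return True
-- ===== Notes on version B (the rewrite author's own statement) =====
-- stated objective: alternative
-- what changed: The defaultdict counting pass with delete-then-rescan is replaced by sort-then-scan: B sorts the flat list of corner points and walks it once, measuring runs of equal corners (run length = multiplicity) and validating each run in place, with the four bounding-box corners checked by direct list counts; no dictionary is built.
-- outside the precondition, e.g. on isRectangleCover([[0, 0, 0, 0]]): A returns False, B returns False; on isRectangleCover([[-2, -2, -3, 1], [-1, 3, -2, 0]]): A raises KeyError, B returns False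
import Mathlib
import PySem

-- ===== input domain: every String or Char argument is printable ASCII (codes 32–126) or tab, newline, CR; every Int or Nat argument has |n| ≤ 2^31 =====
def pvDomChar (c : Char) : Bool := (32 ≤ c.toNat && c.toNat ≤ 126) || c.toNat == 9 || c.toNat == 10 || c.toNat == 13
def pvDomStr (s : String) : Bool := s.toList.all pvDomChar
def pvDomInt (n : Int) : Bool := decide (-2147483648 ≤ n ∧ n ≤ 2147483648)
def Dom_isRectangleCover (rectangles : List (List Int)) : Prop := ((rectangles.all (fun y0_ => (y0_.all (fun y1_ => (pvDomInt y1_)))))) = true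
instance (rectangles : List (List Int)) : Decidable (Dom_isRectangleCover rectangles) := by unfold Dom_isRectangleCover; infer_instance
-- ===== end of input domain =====

-- B replaces A's defaultdict counting pass (and its delete-then-rescan epilogue) by sort-then-scan:
-- the flat corner list is sorted and walked once in runs of equal corners (run length = multiplicity),
-- the four bounding-box corners checked by direct counts; no dictionary is built.


-- ===== PORT A =====
-- the for-i-in-range loop of A: state (cnt_dic, min_x, min_y, max_a, max_b, arra_sum);
-- none = the ValueError of unpacking a row that is not 4 long
def loopA : List (List Int) → PySem.Dict (Int × Int) Int → Int → Int → Int → Int → Int →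
    Option (PySem.Dict (Int × Int) Int × Int × Int × Int × Int × Int)
  | [], d, mnx, mny, mxa, mxb, ar => some (d, mnx, mny, mxa, mxb, ar)
  | r :: rs, d, mnx, mny, mxa, mxb, ar =>
    match r with
    | [x, y, a, b] =>
      loopA rs
        ((((d.modify (x, y) 0 (· + 1)).modify (x, b) 0 (· + 1)).modify (a, b) 0 (· + 1)).modify (a, y) 0 (· + 1))
        (min mnx x) (min mny y) (max mxa a) (max mxb b) (ar + (a - x) * (b - y))
    | _ => none

def isRectangleCover (rectangles : List (List Int)) : Bool :=
  match rectangles with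
  | [] => false            -- IndexError on rectangles[0]; outside Pre_
  | r0 :: _ =>
    match r0 with
    | [mx, my, ma, mb] =>
      match loopA rectangles PySem.Dict.empty mx my ma mb 0 with
      | none => false      -- ValueError; outside Pre_
      | some (cnt, mnx, mny, mxa, mxb, ar) =>
        if ar ≠ (mxa - mnx) * (mxb - mny) ∨ cnt.getD (mnx, mny) 0 ≠ 1 ∨ cnt.getD (mnx, mxb) 0 ≠ 1 ∨
            cnt.getD (mxa, mny) 0 ≠ 1 ∨ cnt.getD (mxa, mxb) 0 ≠ 1 then false
        else
          ((((cnt.erase (mnx, mny)).erase (mnx, mxb)).erase (mxa, mny)).erase (mxa, mxb)).values.all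
            (fun v => v == 2 || v == 4)
    | _ => false           -- ValueError; outside Pre_

-- ===== PORT B =====
-- unpacking 'x, y, a, b = r' (none = ValueError, outside Pre_)
def quad? : List Int → Option (Int × Int × Int × Int)
  | [x, y, a, b] => some (x, y, a, b)
  | _ => none

-- the four corner points generated for one rectangle
def cornersOf : Int × Int × Int × Int → List (Int × Int)
  | (x, y, a, b) => [(x, y), (x, b), (a, b), (a, y)]

-- B's while loop over the sorted corner list: the inner while finds the end j of the run of
-- corners equal to corners[i] (j - i = takeWhile length + 1), a non-box run whose length is
-- not 2 or 4 returns False, then i jumps to j (here: recurse on the dropWhile remainder).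
def runScan (box : List (Int × Int)) (l : List (Int × Int)) : Bool :=
  match l with
  | [] => true
  | c :: rest =>
    if !box.contains c && !((rest.takeWhile (· == c)).length + 1 == 2 || (rest.takeWhile (· == c)).length + 1 == 4)
    then false
    else runScan box (rest.dropWhile (· == c))
termination_by l.length
decreasing_by
  simp only [List.length_cons]
  have := List.length_dropWhile_le (· == c) rest
  omega

def isRectangleCover_alt (rectangles : List (List Int)) : Bool :=
  match rectangles.mapM quad? with
  | some (q0 :: rest) =>
    let mnx := (rest.map (·.1)).foldl min q0.1
    let mny := (rest.map (·.2.1)).foldl min q0.2.1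
    let mxa := (rest.map (·.2.2.1)).foldl max q0.2.2.1
    let mxb := (rest.map (·.2.2.2)).foldl max q0.2.2.2
    if (((q0 :: rest).map (fun q => (q.2.2.1 - q.1) * (q.2.2.2 - q.2.1))).sum) ≠ (mxa - mnx) * (mxb - mny)
    then false
    else
      let corners := PySem.List.sorted2 ((q0 :: rest).flatMap cornersOf) (·.1) (·.2)
      let box := [(mnx, mny), (mnx, mxb), (mxa, mny), (mxa, mxb)]
      if box.any (fun p => corners.count p != 1) then false
      else runScan box corners
  | _ => false             -- empty list (min() ValueError) or a bad row (ValueError); outside Pre_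

-- ===== PRECONDITION & SPEC =====
-- closed-form bounding-box coordinate: fold f over column j of the rows
def bbFold (f : Int → Int → Int) (j : Nat) (rectangles : List (List Int)) : Int :=
  match rectangles with
  | [] => 0
  | r :: rs => (rs.map (fun r => r.getD j 0)).foldl f (r.getD j 0)

-- Pre_ excludes (a) the empty list (IndexError on rectangles[0]) and rows not of length 4
-- (ValueError on unpacking), where A raises, and (b) inputs whose bounding box is degenerate
-- (min x == max a or min y == max b, reachable only through zero-extent or inverted rectangles):
-- there two bounding-box corners coincide and A's double 'del' of the same key raises KeyError
-- whenever its corner-count checks pass, so the degenerate family is excluded as a whole.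
def Pre_isRectangleCover (rectangles : List (List Int)) : Prop :=
  rectangles ≠ [] ∧ (∀ r ∈ rectangles, r.length = 4) ∧
    bbFold min 0 rectangles ≠ bbFold max 2 rectangles ∧
    bbFold min 1 rectangles ≠ bbFold max 3 rectangles

instance (rectangles : List (List Int)) : Decidable (Pre_isRectangleCover rectangles) := by
  unfold Pre_isRectangleCover; infer_instance

def pvWitness_isRectangleCover : List (List Int) := [[0, 0, 1, 1]]

def Spec_isRectangleCover (rectangles : List (List Int)) (out : Bool) : Prop := out = isRectangleCover_alt rectangles
instance (rectangles : List (List Int)) (out : Bool) : Decidable (Spec_isRectangleCover rectangles out) := by unfold Spec_isRectangleCover; infer_instance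

-- ===== CLAIM (what is proved, stated in full; the proofs are below) =====
def Claim_equal_isRectangleCover : Prop := ∀ (rectangles : List (List Int)), Dom_isRectangleCover rectangles → Pre_isRectangleCover rectangles → Spec_isRectangleCover rectangles (isRectangleCover rectangles)

-- ===== LEMMAS AND PROOFS =====

theorem quad?_eq_some (r : List Int) (q : Int × Int × Int × Int) (h : quad? r = some q) :
    r = [q.1, q.2.1, q.2.2.1, q.2.2.2] := by
  rcases r with _ | ⟨x, (_ | ⟨y, (_ | ⟨a, (_ | ⟨b, (_ | ⟨c, t⟩)⟩)⟩)⟩)⟩ <;>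
    (simp [quad?] at h; try simp [← h])

theorem loopA_eq (rs : List (List Int)) (rows : List (Int × Int × Int × Int))
    (d : PySem.Dict (Int × Int) Int) (mnx mny mxa mxb ar : Int)
    (h : rs.mapM quad? = some rows) :
    loopA rs d mnx mny mxa mxb ar = some
      ((rows.flatMap cornersOf).foldl (fun d c => d.modify c 0 (· + 1)) d,
       (rows.map (·.1)).foldl min mnx,
       (rows.map (·.2.1)).foldl min mny,
       (rows.map (·.2.2.1)).foldl max mxa,
       (rows.map (·.2.2.2)).foldl max mxb,
       ar + (rows.map (fun q => (q.2.2.1 - q.1) * (q.2.2.2 - q.2.1))).sum) := by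
  induction rs generalizing rows d mnx mny mxa mxb ar with
  | nil =>
    simp [List.mapM_nil] at h
    subst h
    simp [loopA]
  | cons r rs ih =>
    rw [List.mapM_cons] at h
    rcases hq : quad? r with _ | q
    · simp [hq] at h
    rcases hrest : rs.mapM quad? with _ | rows'
    · simp [hq, hrest] at h
    simp [hq, hrest] at h
    subst h
    obtain ⟨x, y, a, b⟩ := q
    have hr := quad?_eq_some r _ hq
    simp only at hr
    subst hr
    simp only [loopA]
    rw [ih _ _ _ _ _ _ _ hrest]
    simp [cornersOf]
    ring

theorem mapM_quad_of_len (rs : List (List Int)) (h : ∀ r ∈ rs, r.length = 4) :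
    ∃ rows, rs.mapM quad? = some rows := by
  induction rs with
  | nil => exact ⟨[], by simp⟩
  | cons r rs ih =>
    obtain ⟨rows, hrows⟩ := ih (fun r hr => h r (List.mem_cons_of_mem _ hr))
    have hr : r.length = 4 := h r List.mem_cons_self
    rcases r with _ | ⟨x, (_ | ⟨y, (_ | ⟨a, (_ | ⟨b, (_ | ⟨c, t⟩)⟩)⟩)⟩)⟩ <;> simp at hr
    exact ⟨(x, y, a, b) :: rows, by rw [List.mapM_cons]; simp [quad?, hrows]⟩

theorem erase_items {K V : Type} [BEq K] (d : PySem.Dict K V) (k : K) :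
    (d.erase k).items = d.items.filter (fun p => !(p.1 == k)) := by
  cases d; simp [PySem.Dict.erase]

theorem values_erase4_eq (cnt : PySem.Dict (Int × Int) Int) (c1 c2 c3 c4 : Int × Int) :
    (((((cnt.erase c1).erase c2).erase c3).erase c4).values.all (fun v => v == 2 || v == 4))
      = (cnt.items.filter (fun pv => !([c1, c2, c3, c4].contains pv.1))).all
          (fun pv => pv.2 == 2 || pv.2 == 4) := by
  have hitems : ((((cnt.erase c1).erase c2).erase c3).erase c4).items
      = cnt.items.filter (fun pv => !([c1, c2, c3, c4].contains pv.1)) := by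
    simp only [erase_items, List.filter_filter]
    apply List.filter_congr
    intro pv _
    simp only [List.contains_cons, List.contains_nil]
    rcases pv with ⟨k, v⟩
    rcases e1 : k == c1 <;> rcases e2 : k == c2 <;> rcases e3 : k == c3 <;>
      rcases e4 : k == c4 <;> simp_all
  simp only [PySem.Dict.values, hitems, List.all_map]
  rfl

-- the strict comparison sorted2 uses on (fst, snd), and the lexicographic ≤ it sorts by
def pyLt (a b : Int × Int) : Bool := decide (a.1 < b.1) || (!decide (b.1 < a.1) && decide (a.2 < b.2))
def lexLE (a b : Int × Int) : Prop := a.1 < b.1 ∨ (a.1 = b.1 ∧ a.2 ≤ b.2)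

theorem lexLE_of_pyLt_true {a b : Int × Int} (h : pyLt a b = true) : lexLE a b := by
  simp [pyLt] at h; unfold lexLE; omega

theorem lexLE_of_pyLt_false {a b : Int × Int} (h : pyLt a b = false) : lexLE b a := by
  simp [pyLt] at h; unfold lexLE; omega

theorem lexLE_trans {a b c : Int × Int} (h1 : lexLE a b) (h2 : lexLE b c) : lexLE a c := by
  unfold lexLE at *; omega

theorem lexLE_antisymm {a b : Int × Int} (h1 : lexLE a b) (h2 : lexLE b a) : a = b := by
  unfold lexLE at *
  have : a.1 = b.1 ∧ a.2 = b.2 := by omega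
  exact Prod.ext this.1 this.2

theorem insertBy_pairwise (x : Int × Int) (ys : List (Int × Int)) (h : ys.Pairwise lexLE) :
    (PySem.List.insertBy pyLt x ys).Pairwise lexLE := by
  induction ys with
  | nil => simp [PySem.List.insertBy]
  | cons y ys ih =>
    rw [List.pairwise_cons] at h
    obtain ⟨hy, hys⟩ := h
    simp only [PySem.List.insertBy]
    rcases hlt : pyLt x y with _ | _
    · simp only [Bool.false_eq_true, if_false]
      rw [List.pairwise_cons]
      refine ⟨?_, ih hys⟩
      intro z hz
      rcases (PySem.List.mem_insertBy pyLt x z ys).mp hz with rfl | hz'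
      · exact lexLE_of_pyLt_false hlt
      · exact hy z hz'
    · simp only [if_true]
      rw [List.pairwise_cons]
      refine ⟨?_, List.pairwise_cons.mpr ⟨hy, hys⟩⟩
      intro z hz
      have hxy := lexLE_of_pyLt_true hlt
      rcases List.mem_cons.mp hz with rfl | hz'
      · exact hxy
      · exact lexLE_trans hxy (hy z hz')

theorem foldl_insertBy_pairwise (cs : List (Int × Int)) (acc : List (Int × Int))
    (h : acc.Pairwise lexLE) :
    (cs.foldl (fun acc x => PySem.List.insertBy pyLt x acc) acc).Pairwise lexLE := by
  induction cs generalizing acc with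
  | nil => exact h
  | cons c cs ih => exact ih _ (insertBy_pairwise c acc h)

theorem sorted2_eq (cs : List (Int × Int)) :
    PySem.List.sorted2 cs (·.1) (·.2) false
      = cs.foldl (fun acc x => PySem.List.insertBy pyLt x acc) [] := rfl

theorem sorted2_pairwise (cs : List (Int × Int)) :
    (PySem.List.sorted2 cs (·.1) (·.2) false).Pairwise lexLE := by
  rw [sorted2_eq]; exact foldl_insertBy_pairwise cs [] (by simp)

theorem take_all_eq (c : Int × Int) (rest : List (Int × Int)) :
    ∀ z ∈ rest.takeWhile (· == c), z = c := by
  intro z hz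
  have := List.mem_takeWhile_imp hz
  simpa using this

-- on a lexicographically ordered list the head's run exhausts its occurrences
theorem head_not_mem_drop (c : Int × Int) (rest : List (Int × Int))
    (h : (c :: rest).Pairwise lexLE) : c ∉ rest.dropWhile (· == c) := by
  intro hc
  rw [List.pairwise_cons] at h
  obtain ⟨hhead, hrest⟩ := h
  rcases hr : rest.dropWhile (· == c) with _ | ⟨hd, t⟩
  · rw [hr] at hc; simp at hc
  · have hh := List.head?_dropWhile_not (· == c) rest
    rw [hr] at hh
    simp only [List.head?_cons] at hh
    have hhd : hd ≠ c := by simpa using hh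
    rw [hr] at hc
    rcases List.mem_cons.mp hc with rfl | hct
    · exact hhd rfl
    · have hsub : (hd :: t).Sublist rest := hr ▸ List.dropWhile_sublist (· == c)
      have hpw : (hd :: t).Pairwise lexLE := List.Pairwise.sublist hsub hrest
      have h1 : lexLE hd c := (List.pairwise_cons.mp hpw).1 c hct
      have h2 : lexLE c hd := hhead hd (hsub.mem List.mem_cons_self)
      exact hhd (lexLE_antisymm h1 h2)

theorem count_head_run (c : Int × Int) (rest : List (Int × Int))
    (h : (c :: rest).Pairwise lexLE) :
    (c :: rest).count c = (rest.takeWhile (· == c)).length + 1 := by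
  have hnd : c ∉ rest.dropWhile (· == c) := head_not_mem_drop c rest h
  conv_lhs => rw [List.count_cons_self, ← List.takeWhile_append_dropWhile (p := (· == c)) (l := rest)]
  rw [List.count_append]
  have h1 : (rest.takeWhile (· == c)).count c = (rest.takeWhile (· == c)).length := by
    rw [List.count_eq_length]
    intro b hb
    have := take_all_eq c rest b hb
    simp [this]
  have h2 : (rest.dropWhile (· == c)).count c = 0 := List.count_eq_zero.mpr hnd
  omega

theorem count_tail_run (c k : Int × Int) (rest : List (Int × Int)) (hk : k ≠ c) :
    (c :: rest).count k = (rest.dropWhile (· == c)).count k := by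
  conv_lhs => rw [List.count_cons_of_ne (Ne.symm hk),
    ← List.takeWhile_append_dropWhile (p := (· == c)) (l := rest)]
  rw [List.count_append]
  have h1 : (rest.takeWhile (· == c)).count k = 0 := by
    rw [List.count_eq_zero]
    intro hkmem
    exact hk (take_all_eq c rest k hkmem)
  omega

theorem mem_cons_split (c k : Int × Int) (rest : List (Int × Int)) (hk : k ∈ c :: rest) :
    k = c ∨ k ∈ rest.dropWhile (· == c) := by
  rcases List.mem_cons.mp hk with rfl | hk'
  · exact Or.inl rfl
  · rw [← List.takeWhile_append_dropWhile (p := (· == c)) (l := rest)] at hk'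
    rcases List.mem_append.mp hk' with h1 | h2
    · exact Or.inl (take_all_eq c rest k h1)
    · exact Or.inr h2

theorem runScan_iff (box : List (Int × Int)) (l : List (Int × Int)) (h : l.Pairwise lexLE) :
    runScan box l = true ↔
      ∀ k ∈ l, box.contains k = false → (l.count k = 2 ∨ l.count k = 4) := by
  induction hn : l.length using Nat.strong_induction_on generalizing l with
  | _ n ih =>
  rcases l with _ | ⟨c, rest⟩
  · simp [runScan]
  · have hrun := count_head_run c rest h
    have hnd : c ∉ rest.dropWhile (· == c) := head_not_mem_drop c rest h
    have hdrop_pw : (rest.dropWhile (· == c)).Pairwise lexLE :=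
      List.Pairwise.sublist (List.dropWhile_sublist (· == c)) (List.pairwise_cons.mp h).2
    have hlt : (rest.dropWhile (· == c)).length < n := by
      have := List.length_dropWhile_le (· == c) rest
      simp only [List.length_cons] at hn
      omega
    have IH := ih _ hlt (rest.dropWhile (· == c)) hdrop_pw rfl
    have hdmem : ∀ k ∈ rest.dropWhile (· == c), k ∈ c :: rest := by
      intro k hk
      exact List.mem_cons_of_mem c (((List.dropWhile_sublist (· == c)).mem) hk)
    have hdcnt : ∀ k ∈ rest.dropWhile (· == c),
        (c :: rest).count k = (rest.dropWhile (· == c)).count k := by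
      intro k hk
      exact count_tail_run c k rest (fun e => hnd (e ▸ hk))
    rw [runScan]
    by_cases hbc : box.contains c = true
    · simp only [hbc, Bool.not_true, Bool.false_and, Bool.false_eq_true, if_false]
      rw [IH]
      constructor
      · intro hall k hk hkb
        rcases mem_cons_split c k rest hk with rfl | hk'
        · rw [hbc] at hkb; exact absurd hkb (by simp)
        · rw [hdcnt k hk']; exact hall k hk' hkb
      · intro hall k hk hkb
        rw [← hdcnt k hk]; exact hall k (hdmem k hk) hkb
    · replace hbc : box.contains c = false := by simpa using hbc
      by_cases hr24 : (rest.takeWhile (· == c)).length + 1 = 2 ∨ (rest.takeWhile (· == c)).length + 1 = 4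
      · have hcond : (!box.contains c &&
            !((rest.takeWhile (· == c)).length + 1 == 2 || (rest.takeWhile (· == c)).length + 1 == 4)) = false := by
          rcases hr24 with h2 | h2 <;> simp [h2]
        rw [hcond]
        simp only [Bool.false_eq_true, if_false]
        rw [IH]
        constructor
        · intro hall k hk hkb
          rcases mem_cons_split c k rest hk with rfl | hk'
          · rw [hrun]; exact hr24
          · rw [hdcnt k hk']; exact hall k hk' hkb
        · intro hall k hk hkb
          rw [← hdcnt k hk]; exact hall k (hdmem k hk) hkb
      · have hc' : c ∉ box := by simpa using hbc
        rw [not_or] at hr24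
        have hcond : (!box.contains c &&
            !((rest.takeWhile (· == c)).length + 1 == 2 || (rest.takeWhile (· == c)).length + 1 == 4)) = true := by
          simp [hc']
          omega
        rw [hcond, if_pos rfl]
        simp only [Bool.false_eq_true, false_iff]
        intro hall
        have := hall c List.mem_cons_self hbc
        rw [hrun] at this
        rcases this with h2 | h2
        · exact hr24.1 h2
        · exact hr24.2 h2

-- A's remaining-values check, through counter items, as a statement about counts
theorem aFinal_iff (cs : List (Int × Int)) (box : List (Int × Int)) :
    ((PySem.Dict.counter cs).items.filter (fun pv => !(box.contains pv.1))).all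
        (fun pv => pv.2 == 2 || pv.2 == 4) = true ↔
      ∀ k ∈ cs, box.contains k = false → (cs.count k = 2 ∨ cs.count k = 4) := by
  rw [PySem.Dict.items_counter, List.filter_map, List.all_map]
  simp only [List.all_eq_true, List.mem_filter, Function.comp]
  constructor
  · intro hall k hk hkb
    have := hall k ⟨(PySem.Set.mem_ofList cs k).mpr hk, by simpa using hkb⟩
    simp only [Bool.or_eq_true, beq_iff_eq] at this
    rcases this with h2 | h2
    · left; exact_mod_cast h2
    · right; exact_mod_cast h2
  · intro hall k hk
    obtain ⟨hk1, hk2⟩ := hk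
    have hkb : box.contains k = false := by simpa using hk2
    have := hall k ((PySem.Set.mem_ofList cs k).mp hk1) hkb
    simp only [Bool.or_eq_true, beq_iff_eq]
    rcases this with h2 | h2
    · left; exact_mod_cast h2
    · right; exact_mod_cast h2

-- the whole epilogue, A's shape = B's shape, for cnt = Counter(cs) and corners = sorted(cs)
theorem final_eq (cs : List (Int × Int)) (ar X : Int) (c1 c2 c3 c4 : Int × Int) :
    (if ar ≠ X ∨ (PySem.Dict.counter cs).getD c1 0 ≠ 1 ∨ (PySem.Dict.counter cs).getD c2 0 ≠ 1 ∨
        (PySem.Dict.counter cs).getD c3 0 ≠ 1 ∨ (PySem.Dict.counter cs).getD c4 0 ≠ 1 then false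
     else (((((PySem.Dict.counter cs).erase c1).erase c2).erase c3).erase c4).values.all
        (fun v => v == 2 || v == 4))
    =
    (if ar ≠ X then false
     else if [c1, c2, c3, c4].any
         (fun p => (PySem.List.sorted2 cs (·.1) (·.2) false).count p != 1) then false
     else runScan [c1, c2, c3, c4] (PySem.List.sorted2 cs (·.1) (·.2) false)) := by
  have hperm : (PySem.List.sorted2 cs (·.1) (·.2) false).Perm cs := PySem.List.sorted2_perm cs (·.1) (·.2) false
  have hcnt : ∀ p, (PySem.List.sorted2 cs (·.1) (·.2) false).count p = cs.count p :=
    fun p => hperm.count_eq p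
  have hgetD : ∀ p, (PySem.Dict.counter cs).getD p 0 = (cs.count p : Int) :=
    fun p => PySem.Dict.getD_counter cs p
  by_cases har : ar = X
  · by_cases hc : cs.count c1 = 1 ∧ cs.count c2 = 1 ∧ cs.count c3 = 1 ∧ cs.count c4 = 1
    · obtain ⟨h1, h2, h3, h4⟩ := hc
      have hA : ¬(ar ≠ X ∨ (PySem.Dict.counter cs).getD c1 0 ≠ 1 ∨ (PySem.Dict.counter cs).getD c2 0 ≠ 1 ∨
          (PySem.Dict.counter cs).getD c3 0 ≠ 1 ∨ (PySem.Dict.counter cs).getD c4 0 ≠ 1) := by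
        simp only [hgetD, h1, h2, h3, h4, har]
        norm_num
      have hB : ([c1, c2, c3, c4].any
          (fun p => (PySem.List.sorted2 cs (·.1) (·.2) false).count p != 1)) = false := by
        simp [hcnt, h1, h2, h3, h4]
      rw [if_neg hA, if_neg (by simpa using har), hB]
      simp only [Bool.false_eq_true, if_false]
      rw [values_erase4_eq]
      rw [Bool.eq_iff_iff]
      rw [aFinal_iff cs [c1, c2, c3, c4],
        runScan_iff [c1, c2, c3, c4] _ (sorted2_pairwise cs)]
      constructor
      · intro hall k hk hkb
        rw [hcnt k]
        exact hall k (hperm.mem_iff.mp hk) hkb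
      · intro hall k hk hkb
        rw [← hcnt k]
        exact hall k (hperm.mem_iff.mpr hk) hkb
    · have hA : (ar ≠ X ∨ (PySem.Dict.counter cs).getD c1 0 ≠ 1 ∨ (PySem.Dict.counter cs).getD c2 0 ≠ 1 ∨
          (PySem.Dict.counter cs).getD c3 0 ≠ 1 ∨ (PySem.Dict.counter cs).getD c4 0 ≠ 1) := by
        simp only [hgetD]
        right
        omega
      have hB : ([c1, c2, c3, c4].any
          (fun p => (PySem.List.sorted2 cs (·.1) (·.2) false).count p != 1)) = true := by
        simp only [List.any_cons, List.any_nil, Bool.or_eq_true, bne_iff_ne, hcnt]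
        omega
      rw [if_pos hA, if_neg (by simpa using har), hB]
      simp
  · rw [if_pos (Or.inl har), if_pos (by simpa using har)]

-- ===== VERDICT (by name: the statement is the Claim_ definition above) =====
theorem isRectangleCover_spec : Claim_equal_isRectangleCover := by
  intro rectangles _ hpre
  unfold Spec_isRectangleCover
  obtain ⟨hne, hlen, _, _⟩ := hpre
  obtain ⟨rows, hrows⟩ := mapM_quad_of_len rectangles hlen
  rcases rectangles with _ | ⟨r0, rs⟩
  · exact absurd rfl hne
  have h0 : r0.length = 4 := hlen r0 List.mem_cons_self
  rcases r0 with _ | ⟨x, (_ | ⟨y, (_ | ⟨a, (_ | ⟨b, (_ | ⟨c, t⟩)⟩)⟩)⟩)⟩ <;> simp at h0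
  rw [List.mapM_cons] at hrows
  rcases h : List.mapM quad? rs with _ | w <;> simp [quad?, h] at hrows
  rcases rows with _ | ⟨q0, rest⟩
  · simp at hrows
  simp at hrows
  obtain ⟨hq0, hrest⟩ := hrows
  subst hq0
  subst hrest
  have hmapm : List.mapM quad? ([x, y, a, b] :: rs) = some ((x, y, a, b) :: w) := by
    rw [List.mapM_cons]; simp [quad?, h]
  simp only [isRectangleCover, isRectangleCover_alt, hmapm]
  rw [loopA_eq _ _ _ _ _ _ _ _ hmapm]
  simp only [List.map_cons, List.foldl_cons, min_self, max_self, List.flatMap_cons, zero_add]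
  rw [← PySem.Dict.counter_eq_foldl]
  exact final_eq _ _ _ _ _ _ _
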